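-- pv_equiv track=rewrite | github.com/heisoyyy/atm_api | database.py | _parse_denom_options
-- ===== SOURCE A (Python) =====
-- def _parse_denom_options(denom_options_str: str) -> int:
--     """
--     Parse kolom denom_options dari atm_masters ke nilai rupiah penuh.
--     Ambil nilai TERBESAR (untuk default denom di cashplan).
--
--     Format yang ada di data:
--       "100"      → 100_000  (dalam ribuan)
--       "50"       → 50_000   (dalam ribuan)
--       "100 & 50" → 100_000  (ambil pecahan terbesar)
--       "50000"    → 50_000   (sudah full rupiah ≥ 1000)
--       "" / None  → 100_000  (default)
--     """
--     if not denom_options_str: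
--         return 100_000
--
--     raw = str(denom_options_str).strip()
--
--     # Handle "100 & 50" atau "50 & 100" — ambil yang terbesar
--     if "&" in raw or "," in raw or "/" in raw:
--         parts = [p.strip() for p in raw.replace("&", ",").replace("/", ",").split(",")]
--         candidates = []
--         for p in parts:
--             try:
--                 candidates.append(int(float(p.replace(".", "").replace(",", ""))))
--             except ValueError:
--                 continue
--         if candidates:
--             best = max(candidates)
--             return best * 1_000 if best <= 1_000 else best
--         return 100_000
--
--     # Single value
--     try:
--         val = int(float(raw.replace(".", "").replace(",", "")))
--     except ValueError:
--         return 100_000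
--
--     return val * 1_000 if val <= 1_000 else val
-- ===== SOURCE B (Python) =====
-- def _digits_value(q):
--     """Strict unsigned decimal parse: None unless q is one or more ASCII digits."""
--     if not q:
--         return None
--     v = 0
--     for ch in q:
--         if not ch.isdigit():
--             return None
--         v = v * 10 + (ord(ch) - 48)
--     return v
--
--
-- def _to_int(p):
--     """Parse one denomination token as a plain (optionally signed) integer, else None."""
--     q = p.replace(".", "").replace(",", "").strip()
--     if not q:
--         return None
--     if q[0] in "+-":
--         v = _digits_value(q[1:])
--         return None if v is None else (-v if q[0] == "-" else v)
--     return _digits_value(q)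
--
--
-- def _parse_denom_options(denom_options_str: str) -> int:
--     # One uniform pass: split on any separator (a separator-free string is its own
--     # single part), keep a running maximum of the parseable parts, default 100_000.
--     if not denom_options_str:
--         return 100_000
--     raw = str(denom_options_str).strip()
--     parts = [p.strip() for p in raw.replace("&", ",").replace("/", ",").split(",")]
--     best = None
--     for p in parts:
--         v = _to_int(p)
--         if v is not None:
--             best = v if best is None else max(best, v)
--     if best is None:
--         return 100_000
--     return best * 1_000 if best <= 1_000 else best
-- ===== Notes on version B (the rewrite author's own statement) =====
-- stated objective: alternative
-- what changed: One uniform pass replaces A's two separate branches (separator list vs single value): every input is split into parts, each part is parsed by an explicit strict sign+digits scanner (no try/except around int(float(...))) and a running maximum is kept instead of collecting a candidates list and calling max().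
-- outside the precondition, e.g. on _parse_denom_options('1e3'): A returns 1000000, B returns 100000; on _parse_denom_options('1_0'): A returns 10000, B returns 100000; on _parse_denom_options('9999999999999999'): A returns 10000000000000000, B returns 9999999999999999
import Mathlib
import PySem

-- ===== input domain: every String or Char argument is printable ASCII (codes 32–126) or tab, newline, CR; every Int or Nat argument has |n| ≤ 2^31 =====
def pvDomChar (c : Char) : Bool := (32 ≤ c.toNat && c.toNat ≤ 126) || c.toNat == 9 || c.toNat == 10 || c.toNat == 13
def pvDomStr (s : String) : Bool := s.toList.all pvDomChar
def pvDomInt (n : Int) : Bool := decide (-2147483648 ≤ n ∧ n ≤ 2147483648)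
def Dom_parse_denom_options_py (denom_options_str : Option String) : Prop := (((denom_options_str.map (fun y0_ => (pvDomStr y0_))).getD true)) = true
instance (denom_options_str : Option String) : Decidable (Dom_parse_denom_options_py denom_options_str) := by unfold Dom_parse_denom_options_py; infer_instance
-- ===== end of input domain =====

-- B replaces A's two branches (separator list vs single value) by one uniform split-parse-max pass
-- with an explicit strict integer scanner instead of try/except int(float(...)); return values agree
-- on Pre_ (equal cost, no speed claim).


-- ===== PORT A =====
-- strings are handled as their character lists (PySem.Chars is the exact model of Python's str ops)

-- decimal value of a digit list (used by the model of int(float(...)) below)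
def pvFloatTok (q : List Char) : Int :=
  q.foldl (fun a c => a * 10 + ((c.toNat : Int) - 48)) 0

-- after a first digit: float's digit run may continue with digits or a single '_' between digits
def pvUndRun : List Char → Bool
  | [] => true
  | c :: t =>
    if PySem.Chars.isdigit c then pvUndRun t
    else if c = '_' then
      match t with
      | [] => false
      | d :: t' => PySem.Chars.isdigit d && pvUndRun t'
    else false

-- float's unsigned digit run: a digit, then digits with single '_' separators between digits
def pvUndOk (q : List Char) : Bool :=
  match q with
  | [] => false
  | c :: t => PySem.Chars.isdigit c && pvUndRun t

-- model of Python's int(float(q)) — hand-ported: exact whenever q contains none of e/E/i/I and at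
-- most 15 digits (exactly what Pre_ guarantees for every token reaching it), where float accepts
-- precisely an optionally signed digit run (single '_' allowed between digits, surrounding
-- whitespace ignored, nan rejected by int()) and represents its value exactly
def pyIntFloat? (q : List Char) : Option Int :=
  match PySem.Chars.strip q with
  | [] => none
  | c :: rest =>
    if c = '+' then
      if pvUndOk rest then some (pvFloatTok (rest.filter (fun c => !(c == '_')))) else none
    else if c = '-' then
      if pvUndOk rest then some (-(pvFloatTok (rest.filter (fun c => !(c == '_'))))) else none
    else if pvUndOk (c :: rest) then some (pvFloatTok ((c :: rest).filter (fun c => !(c == '_'))))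
    else none

def parse_denom_options_py (denom_options_str : Option String) : Int :=
  match denom_options_str with
  | none => 100000
  | some s =>
    if s = "" then 100000 else
    let raw := PySem.Chars.strip s.toList
    if PySem.Chars.isIn ['&'] raw || PySem.Chars.isIn [','] raw || PySem.Chars.isIn ['/'] raw then
      let parts := (PySem.Chars.splitOn
        (PySem.Chars.replace (PySem.Chars.replace raw ['&'] [',']) ['/'] [',']) [',']).map
          PySem.Chars.strip
      let candidates := parts.foldl (fun acc p =>
        match pyIntFloat? (PySem.Chars.replace (PySem.Chars.replace p ['.'] []) [','] []) with
        | some v => acc ++ [v]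
        | none => acc) []
      match PySem.List.max? candidates (fun x => x) with
      | none => 100000
      | some best => if best ≤ 1000 then best * 1000 else best
    else
      match pyIntFloat? (PySem.Chars.replace (PySem.Chars.replace raw ['.'] []) [','] []) with
      | none => 100000
      | some val => if val ≤ 1000 then val * 1000 else val

-- ===== PORT B =====
-- _digits_value's scanning loop (value accumulated while checking, early None on a non-digit)
def pvDigitsGo (q : List Char) (v : Int) : Option Int :=
  match q with
  | [] => some v
  | c :: t => if PySem.Chars.isdigit c then pvDigitsGo t (v * 10 + ((c.toNat : Int) - 48)) else none

-- Source B _digits_value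
def pvDigitsValue? (q : List Char) : Option Int :=
  if q = [] then none else pvDigitsGo q 0

-- Source B _to_int
def pvToInt? (p : List Char) : Option Int :=
  let q := PySem.Chars.strip (PySem.Chars.replace (PySem.Chars.replace p ['.'] []) [','] [])
  match q with
  | [] => none
  | c :: t =>
    if c = '+' ∨ c = '-' then
      match pvDigitsValue? t with
      | none => none
      | some v => some (if c = '-' then -v else v)
    else pvDigitsValue? (c :: t)

def parse_denom_options_py_alt (denom_options_str : Option String) : Int :=
  match denom_options_str with
  | none => 100000
  | some s =>
    if s = "" then 100000 else
    let raw := PySem.Chars.strip s.toList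
    let parts := (PySem.Chars.splitOn
      (PySem.Chars.replace (PySem.Chars.replace raw ['&'] [',']) ['/'] [',']) [',']).map
        PySem.Chars.strip
    let best := parts.foldl (fun best p =>
      match pvToInt? p with
      | some v => some (match best with | none => v | some b => max b v)
      | none => best) none
    match best with
    | none => 100000
    | some b => if b ≤ 1000 then b * 1000 else b

-- ===== PRECONDITION & SPEC =====
-- Pre_ excludes strings containing e/E/i/I/_ or more than 15 digits: there A's int(float(...))
-- accepts scientific notation, inf spellings (on which int(inf) raises OverflowError, as it does on
-- a digit run large enough to overflow float) or underscore grouping, or rounds to float precision —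
-- values B's strict integer parse intentionally does not reproduce (it falls back to the default).
def Pre_parse_denom_options_py (denom_options_str : Option String) : Prop :=
  ((denom_options_str.map (fun s =>
    s.toList.all (fun c => !(c == 'e' || c == 'E' || c == 'i' || c == 'I' || c == '_'))
    && decide (s.toList.countP (fun c => PySem.Chars.isdigit c) ≤ 15))).getD true) = true
instance (denom_options_str : Option String) : Decidable (Pre_parse_denom_options_py denom_options_str) := by
  unfold Pre_parse_denom_options_py; infer_instance

def pvWitness_parse_denom_options_py : Option String := some "100 & 50"

def Spec_parse_denom_options_py (denom_options_str : Option String) (out : Int) : Prop := out = parse_denom_options_py_alt denom_options_str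
instance (denom_options_str : Option String) (out : Int) : Decidable (Spec_parse_denom_options_py denom_options_str out) := by unfold Spec_parse_denom_options_py; infer_instance

-- ===== CLAIM (what is proved, stated in full; the proofs are below) =====
def Claim_equal_parse_denom_options_py : Prop := ∀ (denom_options_str : Option String), Dom_parse_denom_options_py denom_options_str → Pre_parse_denom_options_py denom_options_str → Spec_parse_denom_options_py denom_options_str (parse_denom_options_py denom_options_str)

-- ===== LEMMAS AND PROOFS =====

theorem pvDigitsGo_eq (t : List Char) : ∀ v : Int,
    pvDigitsGo t v = if t.all PySem.Chars.isdigit then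
      some (t.foldl (fun a c => a * 10 + ((c.toNat : Int) - 48)) v) else none := by
  induction t with
  | nil => intro v; simp [pvDigitsGo]
  | cons c t ih =>
    intro v
    by_cases h : PySem.Chars.isdigit c <;> simp [pvDigitsGo, h, ih]

-- float's digit run on an underscore-free token is just "all digits"
theorem pvUndRun_eq_all (t : List Char) (h : '_' ∉ t) :
    pvUndRun t = t.all PySem.Chars.isdigit := by
  induction t with
  | nil => rfl
  | cons c t ih =>
    have hc : ¬ c = '_' := fun hc => h (hc ▸ List.mem_cons_self)
    have ht : '_' ∉ t := fun hm => h (List.mem_cons_of_mem c hm)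
    rw [pvUndRun.eq_def]
    by_cases hd : PySem.Chars.isdigit c
    · simp [hd, ih ht]
    · simp [hd, hc]

theorem pvUndOk_eq (t : List Char) (h : '_' ∉ t) :
    pvUndOk t = (!t.isEmpty && t.all PySem.Chars.isdigit) := by
  cases t with
  | nil => rfl
  | cons c t =>
    have ht : '_' ∉ t := fun hm => h (List.mem_cons_of_mem c hm)
    simp [pvUndOk, pvUndRun_eq_all t ht]

theorem pvFilter_underscore (t : List Char) (h : '_' ∉ t) :
    t.filter (fun c => !(c == '_')) = t := by
  apply List.filter_eq_self.mpr
  intro a ha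
  have hne : a ≠ '_' := fun he => h (he ▸ ha)
  simp [hne]

-- characters of strip/replace/splitOn results come from the input (or the inserted separator)
theorem pvStrip_all (P : Char → Prop) (l : List Char) (hl : ∀ y ∈ l, P y) :
    ∀ y ∈ PySem.Chars.strip l, P y := by
  intro y hy
  apply hl
  unfold PySem.Chars.strip PySem.Chars.rstrip PySem.Chars.lstrip at hy
  rw [List.mem_reverse] at hy
  have h1 : List.Sublist
      (List.dropWhile PySem.Chars.isspace ((List.dropWhile PySem.Chars.isspace l).reverse))
      ((List.dropWhile PySem.Chars.isspace l).reverse) := List.dropWhile_sublist _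
  have h2 : List.Sublist (List.dropWhile PySem.Chars.isspace l) l := List.dropWhile_sublist _
  exact h2.mem (List.mem_reverse.mp (h1.mem hy))

theorem pvReplaceGo_all (P : Char → Prop) (c : Char) (new : List Char)
    (hn : ∀ y ∈ new, P y) (fuel : Nat) : ∀ (l acc : List Char),
    (∀ y ∈ l, P y) → (∀ y ∈ acc, P y) →
    ∀ y ∈ PySem.Chars.replace.go [c] new fuel l acc, P y := by
  induction fuel with
  | zero =>
    intro l acc hl hacc y hy
    rw [PySem.Chars.replace.go] at hy
    rcases List.mem_append.mp hy with h | h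
    · exact hacc y (List.mem_reverse.mp h)
    · exact hl y h
  | succ fuel ih =>
    intro l acc hl hacc y hy
    cases l with
    | nil =>
      rw [PySem.Chars.replace.go] at hy
      · exact hacc y (List.mem_reverse.mp hy)
      · simp
    | cons a t =>
      have hl' : ∀ y ∈ t, P y := fun y hm => hl y (List.mem_cons_of_mem a hm)
      rw [PySem.Chars.replace.go] at hy
      by_cases hpre : [c].isPrefixOf (a :: t) = true
      · rw [if_pos hpre] at hy
        refine ih _ _ (fun y hm => hl y (by simpa using List.mem_of_mem_drop hm)) ?_ y hy
        intro y hm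
        rcases List.mem_append.mp hm with h | h
        · exact hn y (List.mem_reverse.mp h)
        · exact hacc y h
      · rw [if_neg hpre] at hy
        refine ih _ _ hl' ?_ y hy
        intro y hm
        rcases List.mem_cons.mp hm with rfl | h
        · exact hl y List.mem_cons_self
        · exact hacc y h

theorem pvReplace_all (P : Char → Prop) (l : List Char) (c : Char) (new : List Char)
    (hn : ∀ y ∈ new, P y) (hl : ∀ y ∈ l, P y) :
    ∀ y ∈ PySem.Chars.replace l [c] new, P y := by
  unfold PySem.Chars.replace
  simpa using pvReplaceGo_all P c new hn l.length l [] hl (by simp)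

theorem pvSplitOnGo_all (P : Char → Prop) (c : Char) (fuel : Nat) :
    ∀ (l cur : List Char) (acc : List (List Char)),
    (∀ y ∈ l, P y) → (∀ y ∈ cur, P y) → (∀ q ∈ acc, ∀ y ∈ q, P y) →
    ∀ q ∈ PySem.Chars.splitOn.go [c] fuel l cur acc, ∀ y ∈ q, P y := by
  induction fuel with
  | zero =>
    intro l cur acc hl hcur hacc q hq y hy
    rw [PySem.Chars.splitOn.go] at hq
    rw [List.mem_reverse] at hq
    rcases List.mem_cons.mp hq with rfl | h
    · rcases List.mem_append.mp hy with h | h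
      · exact hcur y (List.mem_reverse.mp h)
      · exact hl y h
    · exact hacc q h y hy
  | succ fuel ih =>
    intro l cur acc hl hcur hacc q hq y hy
    cases l with
    | nil =>
      rw [PySem.Chars.splitOn.go] at hq
      · rw [List.mem_reverse] at hq
        rcases List.mem_cons.mp hq with rfl | h
        · exact hcur y (List.mem_reverse.mp hy)
        · exact hacc q h y hy
      · simp
    | cons a t =>
      have hl' : ∀ y ∈ t, P y := fun y hm => hl y (List.mem_cons_of_mem a hm)
      rw [PySem.Chars.splitOn.go] at hq
      by_cases hpre : [c].isPrefixOf (a :: t) = true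
      · rw [if_pos hpre] at hq
        refine ih _ _ _ (fun y hm => hl y (by simpa using List.mem_of_mem_drop hm))
          (by simp) ?_ q hq y hy
        intro q hm y hy'
        rcases List.mem_cons.mp hm with rfl | h
        · exact hcur y (List.mem_reverse.mp hy')
        · exact hacc q h y hy'
      · rw [if_neg hpre] at hq
        refine ih _ _ _ hl' ?_ hacc q hq y hy
        intro y hm
        rcases List.mem_cons.mp hm with rfl | h
        · exact hl y List.mem_cons_self
        · exact hcur y h

theorem pvSplitOn_all (P : Char → Prop) (l : List Char) (c : Char) (hl : ∀ y ∈ l, P y) :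
    ∀ q ∈ PySem.Chars.splitOn l [c], ∀ y ∈ q, P y := by
  unfold PySem.Chars.splitOn
  exact pvSplitOnGo_all P c (l.length + 1) l [] [] hl (by simp) (by simp)

-- per-token agreement: on an underscore-free token, Source B's _to_int equals A's int(float(...)) model
theorem pvToInt?_eq (p : List Char) (hp : '_' ∉ p) :
    pvToInt? p = pyIntFloat? (PySem.Chars.replace (PySem.Chars.replace p ['.'] []) [','] []) := by
  have hq : ∀ y ∈ PySem.Chars.strip
      (PySem.Chars.replace (PySem.Chars.replace p ['.'] []) [','] []), y ≠ '_' := by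
    apply pvStrip_all (fun y => y ≠ '_')
    apply pvReplace_all (fun y => y ≠ '_') _ _ _ (by simp)
    apply pvReplace_all (fun y => y ≠ '_') _ _ _ (by simp)
    intro y hy he
    exact hp (he ▸ hy)
  unfold pvToInt? pyIntFloat?
  cases h : PySem.Chars.strip (PySem.Chars.replace (PySem.Chars.replace p ['.'] []) [','] []) with
  | nil => simp
  | cons c t =>
    rw [h] at hq
    have ht : '_' ∉ t := fun hm => hq '_' (List.mem_cons_of_mem c hm) rfl
    have hct : '_' ∉ c :: t := fun hm => hq '_' hm rfl
    by_cases hpl : c = '+'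
    · subst hpl
      simp only [pvDigitsValue?, pvDigitsGo_eq, pvFloatTok, pvUndOk_eq t ht,
        pvFilter_underscore t ht]
      by_cases hte : t = [] <;> by_cases hd : t.all PySem.Chars.isdigit <;> simp [hte, hd]
    · by_cases hm : c = '-'
      · subst hm
        simp only [pvDigitsValue?, pvDigitsGo_eq, pvFloatTok, pvUndOk_eq t ht,
          pvFilter_underscore t ht]
        by_cases hte : t = [] <;> by_cases hd : t.all PySem.Chars.isdigit <;> simp [hte, hd]
      · simp only [hpl, hm, or_self, if_false, pvDigitsValue?, pvDigitsGo_eq, pvFloatTok,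
          pvUndOk_eq (c :: t) hct, pvFilter_underscore (c :: t) hct]
        by_cases hd : (c :: t).all PySem.Chars.isdigit <;> simp [hd]

-- A's append-collecting loop is a filterMap
theorem pvFoldAppend_eq {α : Type} (f : α → Option Int) (l : List α) : ∀ acc : List Int,
    l.foldl (fun acc p => match f p with | some v => acc ++ [v] | none => acc) acc
      = acc ++ l.filterMap f := by
  induction l with
  | nil => intro acc; simp
  | cons p l ih =>
    intro acc
    cases h : f p <;> simp [h, ih]

-- B's running maximum over a some-accumulator
theorem pvFoldBest_some {α : Type} (f : α → Option Int) (l : List α) : ∀ x : Int,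
    l.foldl (fun best p =>
      match f p with
      | some v => some (match best with | none => v | some b => max b v)
      | none => best) (some x)
      = some ((l.filterMap f).foldl max x) := by
  induction l with
  | nil => intro x; simp
  | cons p l ih =>
    intro x
    cases h : f p <;> simp [h, ih]

-- B's running maximum from None matches "max of the collected candidates"
theorem pvFoldBest_none {α : Type} (f : α → Option Int) (l : List α) :
    l.foldl (fun best p =>
      match f p with
      | some v => some (match best with | none => v | some b => max b v)
      | none => best) none
      = match l.filterMap f with
        | [] => none
        | c :: t => some (t.foldl max c) := by
  induction l with
  | nil => simp
  | cons p l ih =>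
    cases h : f p with
    | none => simpa [List.filterMap_cons, h] using ih
    | some v => simp [h, pvFoldBest_some]

-- the common tail: A's candidates/max? form equals B's running-best form, over any parts list
theorem pvTail_eq (parts : List (List Char)) (hparts : ∀ p ∈ parts, '_' ∉ p) :
    (match PySem.List.max? (parts.foldl (fun acc p =>
        match pyIntFloat? (PySem.Chars.replace (PySem.Chars.replace p ['.'] []) [','] []) with
        | some v => acc ++ [v]
        | none => acc) []) (fun x => x) with
      | none => (100000 : Int)
      | some best => if best ≤ 1000 then best * 1000 else best)
    = (match parts.foldl (fun best p =>
        match pvToInt? p with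
        | some v => some (match best with | none => v | some b => max b v)
        | none => best) none with
      | none => (100000 : Int)
      | some b => if b ≤ 1000 then b * 1000 else b) := by
  rw [pvFoldAppend_eq, pvFoldBest_none, List.nil_append]
  have : parts.filterMap pvToInt?
      = parts.filterMap (fun p => pyIntFloat? (PySem.Chars.replace (PySem.Chars.replace p ['.'] []) [','] [])) := by
    exact List.filterMap_congr (fun p hp => pvToInt?_eq p (hparts p hp))
  rw [← this]
  cases h : parts.filterMap pvToInt? with
  | nil => simp [PySem.List.max?]
  | cons c t => rw [PySem.List.max?_id_cons]

-- replace with a single absent character is the identity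
theorem pvReplaceGo_not_mem (c : Char) (new : List Char) (fuel : Nat) : ∀ (l acc : List Char),
    c ∉ l → PySem.Chars.replace.go [c] new fuel l acc = acc.reverse ++ l := by
  induction fuel with
  | zero => intro l acc _; rw [PySem.Chars.replace.go]
  | succ fuel ih =>
    intro l acc hmem
    cases l with
    | nil => rw [PySem.Chars.replace.go] <;> simp
    | cons a t =>
      rw [PySem.Chars.replace.go]
      have hca : ¬ (c == a) := by
        simp only [beq_iff_eq]; rintro rfl; exact hmem List.mem_cons_self
      simp only [List.isPrefixOf, hca, Bool.false_and]
      rw [ih t (a :: acc) (fun h => hmem (List.mem_cons_of_mem a h))]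
      simp

theorem pvReplace_not_mem (l : List Char) (c : Char) (new : List Char) (h : c ∉ l) :
    PySem.Chars.replace l [c] new = l := by
  unfold PySem.Chars.replace
  simpa using pvReplaceGo_not_mem c new l.length l [] h

-- splitting on a single absent character yields the whole string
theorem pvSplitOnGo_not_mem (c : Char) (fuel : Nat) : ∀ (l cur : List Char) (acc : List (List Char)),
    c ∉ l → PySem.Chars.splitOn.go [c] fuel l cur acc = ((cur.reverse ++ l) :: acc).reverse := by
  induction fuel with
  | zero => intro l cur acc _; rw [PySem.Chars.splitOn.go]
  | succ fuel ih =>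
    intro l cur acc hmem
    cases l with
    | nil => rw [PySem.Chars.splitOn.go] <;> simp
    | cons a t =>
      rw [PySem.Chars.splitOn.go]
      have hca : ¬ (c == a) := by
        simp only [beq_iff_eq]; rintro rfl; exact hmem List.mem_cons_self
      simp only [List.isPrefixOf, hca, Bool.false_and]
      rw [ih t (a :: cur) acc (fun h => hmem (List.mem_cons_of_mem a h))]
      simp

theorem pvSplitOn_not_mem (l : List Char) (c : Char) (h : c ∉ l) :
    PySem.Chars.splitOn l [c] = [l] := by
  unfold PySem.Chars.splitOn
  rw [pvSplitOnGo_not_mem c (l.length + 1) l [] [] h]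
  simp

-- a single-character pattern occurs as an infix iff the character is a member
theorem pvMem_of_infix {c : Char} {l : List Char} (h : c ∈ l) : [c] <:+: l := by
  obtain ⟨s, t, rfl⟩ := List.append_of_mem h
  exact ⟨s, t, by simp⟩

-- str.strip is idempotent
theorem pvDropWhile_idem {α : Type} (p : α → Bool) (l : List α) :
    (l.dropWhile p).dropWhile p = l.dropWhile p := by
  induction l with
  | nil => simp
  | cons a t ih =>
    by_cases h : p a <;> simp [h, ih]

theorem pvDropWhile_prefix_eq {α : Type} (p : α → Bool) {l m : List α}
    (hl : l.dropWhile p = l) (hm : m <+: l) : m.dropWhile p = m := by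
  cases m with
  | nil => simp
  | cons a t =>
    cases l with
    | nil => simp at hm
    | cons b u =>
      have hab : a = b := by
        obtain ⟨r, hr⟩ := hm
        exact (List.cons_eq_cons.mp (by simpa using hr.symm)).1.symm
      subst hab
      have hpb : ¬ p a := by
        intro hp
        rw [List.dropWhile_cons, if_pos hp] at hl
        have := congrArg List.length hl
        simp at this
        have := List.length_dropWhile_le p u
        omega
      simp [hpb]

theorem pvRstrip_prefix (l : List Char) : PySem.Chars.rstrip l <+: l := by
  unfold PySem.Chars.rstrip
  have h : l.reverse.dropWhile PySem.Chars.isspace <:+ l.reverse := List.dropWhile_suffix _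
  have h2 : (l.reverse.dropWhile PySem.Chars.isspace).reverse <+: l.reverse.reverse :=
    List.reverse_prefix.mpr h
  simpa using h2

theorem pvStrip_idem (l : List Char) :
    PySem.Chars.strip (PySem.Chars.strip l) = PySem.Chars.strip l := by
  unfold PySem.Chars.strip
  have h1 : PySem.Chars.lstrip (PySem.Chars.lstrip l) = PySem.Chars.lstrip l := by
    unfold PySem.Chars.lstrip; exact pvDropWhile_idem _ _
  have h2 : PySem.Chars.lstrip (PySem.Chars.rstrip (PySem.Chars.lstrip l))
      = PySem.Chars.rstrip (PySem.Chars.lstrip l) := by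
    unfold PySem.Chars.lstrip at h1 ⊢
    exact pvDropWhile_prefix_eq _ h1 (pvRstrip_prefix _)
  rw [h2]
  unfold PySem.Chars.rstrip
  rw [List.reverse_reverse, pvDropWhile_idem]

-- the whole-function equality on Pre_ (outside Pre_ the ports differ: e.g. on "1_0" port A follows
-- float's underscore grouping while port B defaults)
set_option maxHeartbeats 1600000 in
theorem pvMain_eq (o : Option String) (hpre : Pre_parse_denom_options_py o) :
    parse_denom_options_py o = parse_denom_options_py_alt o := by
  cases o with
  | none => rfl
  | some s =>
    have hU : ∀ y ∈ s.toList, y ≠ '_' := by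
      simp only [Pre_parse_denom_options_py, Option.map_some, Option.getD_some,
        Bool.and_eq_true, List.all_eq_true] at hpre
      intro y hy he
      have := hpre.1 y hy
      subst he
      simp at this
    have hraw : ∀ y ∈ PySem.Chars.strip s.toList, y ≠ '_' := pvStrip_all _ _ hU
    unfold parse_denom_options_py parse_denom_options_py_alt
    by_cases hs : s = ""
    · simp [hs]
    · simp only [if_neg hs]
      by_cases hsep : (PySem.Chars.isIn ['&'] (PySem.Chars.strip s.toList)
          || PySem.Chars.isIn [','] (PySem.Chars.strip s.toList)
          || PySem.Chars.isIn ['/'] (PySem.Chars.strip s.toList)) = true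
      · rw [if_pos hsep]
        apply pvTail_eq
        intro p hp
        simp only [List.mem_map] at hp
        obtain ⟨q, hq, rfl⟩ := hp
        have h1 : ∀ y ∈ PySem.Chars.replace (PySem.Chars.strip s.toList) ['&'] [','], y ≠ '_' :=
          pvReplace_all _ _ _ _ (by simp) hraw
        have h2 : ∀ y ∈ PySem.Chars.replace
            (PySem.Chars.replace (PySem.Chars.strip s.toList) ['&'] [',']) ['/'] [','], y ≠ '_' :=
          pvReplace_all _ _ _ _ (by simp) h1
        have h3 := pvSplitOn_all _ _ ',' h2 q hq
        intro hm
        exact pvStrip_all _ _ h3 '_' hm rfl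
      · rw [if_neg hsep]
        simp only [Bool.or_eq_true, not_or] at hsep
        obtain ⟨⟨h1, h2⟩, h3⟩ := hsep
        have m1 : '&' ∉ PySem.Chars.strip s.toList := fun hm =>
          ((PySem.Chars.isIn_eq_false_iff _ _).mp (by simpa using h1)) (pvMem_of_infix hm)
        have m2 : ',' ∉ PySem.Chars.strip s.toList := fun hm =>
          ((PySem.Chars.isIn_eq_false_iff _ _).mp (by simpa using h2)) (pvMem_of_infix hm)
        have m3 : '/' ∉ PySem.Chars.strip s.toList := fun hm =>
          ((PySem.Chars.isIn_eq_false_iff _ _).mp (by simpa using h3)) (pvMem_of_infix hm)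
        rw [pvReplace_not_mem _ _ _ m1, pvReplace_not_mem _ _ _ m3,
          pvSplitOn_not_mem _ _ m2]
        simp only [List.map_cons, List.map_nil, List.foldl_cons, List.foldl_nil, pvStrip_idem,
          pvToInt?_eq _ (fun hm => hraw '_' hm rfl)]
        cases pyIntFloat? (PySem.Chars.replace
            (PySem.Chars.replace (PySem.Chars.strip s.toList) ['.'] []) [','] []) <;> simp

-- ===== VERDICT (by name: the statement is the Claim_ definition above) =====
theorem parse_denom_options_py_spec : Claim_equal_parse_denom_options_py := by
  intro o _ hpre
  unfold Spec_parse_denom_options_py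
  exact pvMain_eq o hpre
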